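-- pv_equiv track=rewrite | github.com/Rohanpatel4/COSC410-2025-AutoGrader | backend/app/services/judge0/test_splitter.py | collect_test_functions
-- ===== SOURCE A (Python) =====
-- from typing import List
--
-- def collect_test_functions(lines: List[str]) -> List[tuple[str, List[str]]]:
--     """
--     Extract test functions from the test file.
--     Returns list of (function_name, function_lines) tuples.
--     """
--     test_functions = []
--     current_function = None
--     current_lines = []
--
--     for line in lines:
--         s = line.strip()
--
--         # Check if this is a test function definition
--         if s.startswith("def test_"):
--             # Save previous function if exists
--             if current_function:
--                 test_functions.append((current_function, current_lines))
--             # Start new function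
--             current_function = s.split("(")[0].replace("def ", "")
--             current_lines = [line]
--         elif current_function:
--             # We're inside a test function
--             if s and not s.startswith("#"):
--                 # Check if we're back at top level (no indentation on non-empty line)
--                 if line and line[0] not in (' ', '\t'):
--                     # End of function, save it
--                     test_functions.append((current_function, current_lines))
--                     current_function = None
--                     current_lines = []
--                 else:
--                     # Still inside function
--                     current_lines.append(line)
--             elif not s:
--                 # Empty line, could be inside or after function
--                 if current_lines:
--                     current_lines.append(line)
--
--     # Save last function if exists
--     if current_function:
--         test_functions.append((current_function, current_lines))
--
--     return test_functions
-- ===== SOURCE B (Python) =====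
-- from typing import List
--
-- def _is_def(line: str) -> bool:
--     return line.strip().startswith("def test_")
--
-- def _trim_body(body: List[str]) -> List[str]:
--     """Keep blank and indented non-comment lines; drop comments; stop at a column-0 line."""
--     kept = []
--     for line in body:
--         s = line.strip()
--         if not s:
--             kept.append(line)
--         elif s.startswith("#"):
--             continue
--         elif line[0] not in (' ', '\t'):
--             break
--         else:
--             kept.append(line)
--     return kept
--
-- def collect_test_functions(lines: List[str]) -> List[tuple[str, List[str]]]:
--     out = []
--     n = len(lines)
--     i = 0
--     while i < n and not _is_def(lines[i]):   # drop the preamble before the first def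
--         i += 1
--     while i < n:
--         header = lines[i]
--         j = i + 1
--         while j < n and not _is_def(lines[j]):   # span of the lines belonging to this def
--             j += 1
--         name = header.strip().split("(")[0].replace("def ", "")
--         out.append((name, [header] + _trim_body(lines[i + 1:j])))
--         i = j
--     return out
-- ===== Notes on version B (the rewrite author's own statement) =====
-- stated objective: simpler
-- what changed: Replaces A's single stateful pass (current_function/current_lines flags with in-loop truncation and a trailing flush) by a two-phase decomposition: chunk the lines at 'def test_' headers, then trim each chunk's body independently with a small helper.
import Mathlib
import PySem

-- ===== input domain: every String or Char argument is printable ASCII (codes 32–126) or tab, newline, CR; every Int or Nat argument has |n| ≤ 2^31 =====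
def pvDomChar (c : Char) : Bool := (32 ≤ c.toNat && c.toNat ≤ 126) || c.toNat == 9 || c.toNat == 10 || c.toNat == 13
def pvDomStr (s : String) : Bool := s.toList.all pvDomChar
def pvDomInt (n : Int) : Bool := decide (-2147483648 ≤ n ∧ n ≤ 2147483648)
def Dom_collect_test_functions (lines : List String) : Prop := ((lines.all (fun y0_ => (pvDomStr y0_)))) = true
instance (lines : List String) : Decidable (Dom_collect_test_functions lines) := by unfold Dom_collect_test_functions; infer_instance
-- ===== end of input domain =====

-- B splits the work into phases (chunk the lines at `def test_` headers, then trim each chunk)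
-- instead of A's single stateful pass; objective: simpler decomposition, same return value.

-- shared helper of both ports: Python's `line[0] in (' ', '\t')` on a (guarded) non-empty line
def pvIndented (line : String) : Bool :=
  match line.toList with
  | [] => false
  | c :: _ => c == ' ' || c == '\t'

-- ===== PORT A =====
-- one loop step of A's for-loop; state = (test_functions, current_function, current_lines)
def pvStepA (acc : List (String × List String) × Option String × List String) (line : String) :
    List (String × List String) × Option String × List String :=
  let s := PySem.Str.strip line
  if PySem.Str.startswith s "def test_" then
    -- `if current_function:` — the stored name always starts with "test_", so truthiness = isSome
    let tf := match acc.2.1 with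
      | some f => acc.1 ++ [(f, acc.2.2)]
      | none   => acc.1
    (tf, some (PySem.Str.replace (((PySem.Str.split? s "(").getD []).headD "") "def " ""), [line])
  else
    match acc.2.1 with
    | none => acc
    | some f =>
      if s ≠ "" ∧ PySem.Str.startswith s "#" = false then
        if line ≠ "" ∧ pvIndented line = false then
          (acc.1 ++ [(f, acc.2.2)], none, [])
        else
          (acc.1, some f, acc.2.2 ++ [line])
      else if s = "" then
        if acc.2.2 ≠ [] then (acc.1, some f, acc.2.2 ++ [line]) else acc
      else acc

-- A's trailing `if current_function: test_functions.append(...)`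
def pvFinishA (st : List (String × List String) × Option String × List String) :
    List (String × List String) :=
  match st.2.1 with
  | some f => st.1 ++ [(f, st.2.2)]
  | none   => st.1

def collect_test_functions (lines : List String) : List (String × List String) :=
  pvFinishA (lines.foldl pvStepA ([], none, []))

-- ===== PORT B =====
def pvIsDef (line : String) : Bool :=
  PySem.Str.startswith (PySem.Str.strip line) "def test_"

-- Source B `_trim_body`: keep blank and indented non-comment lines, drop comments, stop at column 0
def pvTrimBody : List String → List String
  | [] => []
  | line :: rest =>
    let s := PySem.Str.strip line
    if s = "" then line :: pvTrimBody rest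
    else if PySem.Str.startswith s "#" then pvTrimBody rest
    else if pvIndented line = false then []
    else line :: pvTrimBody rest

-- Source B's first while loop: drop the preamble before the first def
def pvDropPre : List String → List String
  | [] => []
  | l :: ls => if pvIsDef l then l :: ls else pvDropPre ls

-- Source B's inner while loop: the span of non-def lines belonging to the current def
def pvSpanBody : List String → List String × List String
  | [] => ([], [])
  | l :: ls =>
    if pvIsDef l then ([], l :: ls)
    else
      let p := pvSpanBody ls
      (l :: p.1, p.2)

theorem pvSpanBody_snd_length_le (ls : List String) : (pvSpanBody ls).2.length ≤ ls.length := by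
  induction ls with
  | nil => simp [pvSpanBody]
  | cons l ls ih =>
    simp only [pvSpanBody]
    split
    · simp
    · exact le_trans ih (Nat.le_succ _)

-- Source B's outer while loop: one chunk (header + trimmed body) per iteration
def pvGoB : List String → List (String × List String)
  | [] => []
  | header :: rest =>
    let p := pvSpanBody rest
    let name := PySem.Str.replace (((PySem.Str.split? (PySem.Str.strip header) "(").getD []).headD "") "def " ""
    (name, header :: pvTrimBody p.1) :: pvGoB p.2
termination_by ls => ls.length
decreasing_by
  exact Nat.lt_succ_of_le (pvSpanBody_snd_length_le rest)

def collect_test_functions_alt (lines : List String) : List (String × List String) :=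
  pvGoB (pvDropPre lines)

-- ===== PRECONDITION & SPEC =====
def Spec_collect_test_functions (lines : List String) (out : List (String × List String)) : Prop := out = collect_test_functions_alt lines
instance (lines : List String) (out : List (String × List String)) : Decidable (Spec_collect_test_functions lines out) := by unfold Spec_collect_test_functions; infer_instance

-- ===== CLAIM (what is proved, stated in full; the proofs are below) =====
def Claim_equal_collect_test_functions : Prop := ∀ (lines : List String), Dom_collect_test_functions lines → Spec_collect_test_functions lines (collect_test_functions lines)

-- ===== LEMMAS AND PROOFS =====

-- the header's function name, as both ports compute it
def pvName (l : String) : String :=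
  PySem.Str.replace (((PySem.Str.split? (PySem.Str.strip l) "(").getD []).headD "") "def " ""

theorem pvDropPre_eq_spanBody_snd (ls : List String) : pvDropPre ls = (pvSpanBody ls).2 := by
  induction ls with
  | nil => rfl
  | cons l ls ih =>
    simp only [pvDropPre, pvSpanBody]
    split <;> simp [ih]

theorem pvStrip_ne_empty {l : String} (h : PySem.Str.strip l ≠ "") : l ≠ "" := by
  intro he
  exact h (he ▸ (by decide : PySem.Str.strip "" = ""))

-- the loop invariant: A's fold, run from either reachable state shape, produces B's chunked output
theorem pvMain (ls : List String) :
    (∀ tf : List (String × List String),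
      pvFinishA (ls.foldl pvStepA (tf, none, [])) = tf ++ pvGoB (pvDropPre ls))
    ∧ (∀ (tf : List (String × List String)) (f : String) (cl : List String), cl ≠ [] →
      pvFinishA (ls.foldl pvStepA (tf, some f, cl)) =
        tf ++ (f, cl ++ pvTrimBody (pvSpanBody ls).1) :: pvGoB (pvSpanBody ls).2) := by
  induction ls with
  | nil =>
    constructor
    · intro tf; simp [pvFinishA, pvDropPre, pvGoB]
    · intro tf f cl _; simp [pvFinishA, pvSpanBody, pvTrimBody, pvGoB]
  | cons l ls ih =>
    by_cases hd : pvIsDef l = true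
    · -- l is a `def test_` header
      have hdC : PySem.Chars.startswith (PySem.Chars.strip l.toList)
          ['d', 'e', 'f', ' ', 't', 'e', 's', 't', '_'] = true := by
        simpa [pvIsDef] using hd
      have hspan : pvSpanBody (l :: ls) = ([], l :: ls) := by simp [pvSpanBody, pvIsDef, hdC]
      have hgo : pvGoB (l :: ls) =
          (pvName l, l :: pvTrimBody (pvSpanBody ls).1) :: pvGoB (pvSpanBody ls).2 := by
        rw [pvGoB]; rfl
      constructor
      · intro tf
        have hstep : pvStepA (tf, none, ([] : List String)) l = (tf, some (pvName l), [l]) := by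
          simp [pvStepA, pvName, hdC]
        rw [List.foldl_cons, hstep, ih.2 tf (pvName l) [l] (by simp)]
        simp [pvDropPre, pvIsDef, hdC, hgo]
      · intro tf f cl _
        have hstep : pvStepA (tf, some f, cl) l = (tf ++ [(f, cl)], some (pvName l), [l]) := by
          simp [pvStepA, pvName, hdC]
        rw [List.foldl_cons, hstep, ih.2 (tf ++ [(f, cl)]) (pvName l) [l] (by simp)]
        simp [hspan, pvTrimBody, hgo]
    · -- l is not a header
      have hdC : PySem.Chars.startswith (PySem.Chars.strip l.toList)
          ['d', 'e', 'f', ' ', 't', 'e', 's', 't', '_'] = false := by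
        simpa [pvIsDef] using hd
      have hspan : pvSpanBody (l :: ls) = (l :: (pvSpanBody ls).1, (pvSpanBody ls).2) := by
        simp [pvSpanBody, pvIsDef, hdC]
      constructor
      · intro tf
        have hstep : pvStepA (tf, none, ([] : List String)) l = (tf, none, []) := by
          simp [pvStepA, hdC]
        rw [List.foldl_cons, hstep, ih.1 tf]
        simp [pvDropPre, pvIsDef, hdC]
      · intro tf f cl hcl
        by_cases hb : PySem.Str.strip l = ""
        · -- blank line: kept by both
          have hstep : pvStepA (tf, some f, cl) l = (tf, some f, cl ++ [l]) := by
            simp [pvStepA, hb, hcl]; decide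
          rw [List.foldl_cons, hstep, ih.2 tf f (cl ++ [l]) (by simp)]
          simp [hspan, pvTrimBody, hb]
        · by_cases hc : PySem.Chars.startswith (PySem.Chars.strip l.toList) ['#'] = true
          · -- comment line: dropped by both
            have hstep : pvStepA (tf, some f, cl) l = (tf, some f, cl) := by
              simp [pvStepA, hdC, hb, hc]
            rw [List.foldl_cons, hstep, ih.2 tf f cl hcl]
            simp [hspan, pvTrimBody, hb, hc]
          · have hcC : PySem.Chars.startswith (PySem.Chars.strip l.toList) ['#'] = false := by
              simpa using hc
            by_cases hi : pvIndented l = true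
            · -- indented code line: kept by both
              have hstep : pvStepA (tf, some f, cl) l = (tf, some f, cl ++ [l]) := by
                simp [pvStepA, hdC, hb, hcC, hi]
              rw [List.foldl_cons, hstep, ih.2 tf f (cl ++ [l]) (by simp)]
              simp [hspan, pvTrimBody, hb, hcC, hi]
            · -- column-0 terminator: A saves and resets; B's trim stops here
              have hl : l ≠ "" := pvStrip_ne_empty hb
              have hi' : pvIndented l = false := by simpa using hi
              have hstep : pvStepA (tf, some f, cl) l = (tf ++ [(f, cl)], none, []) := by
                simp [pvStepA, hdC, hb, hcC, hi', hl]
              rw [List.foldl_cons, hstep, ih.1 (tf ++ [(f, cl)]), pvDropPre_eq_spanBody_snd]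
              simp [hspan, pvTrimBody, hb, hcC, hi']

-- ===== VERDICT (by name: the statement is the Claim_ definition above) =====
theorem collect_test_functions_spec : Claim_equal_collect_test_functions := by
  intro lines _
  unfold Spec_collect_test_functions collect_test_functions collect_test_functions_alt
  simpa using (pvMain lines).1 []
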